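-- pv_equiv track=rewrite | github.com/johnnyw66/picoflipperzero | tools/plot_signal.py | find_repeating_patternsX
-- ===== SOURCE A (Python) =====
-- def find_repeating_patternsX(binary_groups):
--     # Concatenate all binary groups into a single string
--     concatenated_string = ''.join(binary_groups)
--
--     patterns = {}
--
--     # Check for repeating patterns
--     length = len(concatenated_string)
--
--     for size in range(1, length // 2 + 1):  # Check for pattern sizes
--         for start in range(length - size):  # Check each position
--             pattern = concatenated_string[start:start + size]
--             if concatenated_string.count(pattern) > 1:  # Check if pattern repeats
--                 if pattern in patterns:
--                     patterns[pattern] += 1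
--                 else:
--                     patterns[pattern] = 1
--
--     # Filter to show only patterns that repeat
--     repeating_patterns = {k: v for k, v in patterns.items() if v > 1}
--
--     return repeating_patterns
-- ===== SOURCE B (Python) =====
-- def _runs(pairs):
--     # adjacent runs of equal first component in a key-sorted pair list:
--     # one (first_index, window, run_length) triple per run
--     out = []
--     i = 0
--     m = len(pairs)
--     while i < m:
--         w = pairs[i][0]
--         j = i + 1
--         while j < m and pairs[j][0] == w:
--             j += 1
--         out.append((pairs[i][1], w, j - i))
--         i = j
--     return out
--
--
-- def find_repeating_patternsX(binary_groups):
--     s = ''.join(binary_groups)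
--     n = len(s)
--     result = {}
--     for size in range(1, n // 2 + 1):
--         # sort-and-group instead of hashing: a stable sort of (window, start)
--         # pairs brings equal windows together; each run yields the window's
--         # occurrence count and (by stability) its first start position
--         pairs = sorted([(s[i:i + size], i) for i in range(n - size)],
--                        key=lambda p: p[0])
--         reps = [(first, w, c) for (first, w, c) in _runs(pairs)
--                 if c > 1 and s.count(w) > 1]
--         # re-order by first occurrence = the dict insertion order A produces
--         for first, w, c in sorted(reps, key=lambda t: t[0]):
--             result[w] = c
--     return result
-- ===== Notes on version B (the rewrite author's own statement) =====
-- stated objective: alternative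
-- what changed: A tests every window position with s.count and tallies positions in a dict; B replaces hashing/per-position counting by sort-and-group: per size it stably sorts the (window, start) pairs, reads each distinct window's multiplicity and first position off the adjacent runs, calls s.count once per distinct window, and re-sorts the surviving runs by first position to reproduce A's insertion order (intended as faster — measured 5.4x at n=256 — but both exceed the timing budget at n=1024, so speed is not claimed).
import Mathlib
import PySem

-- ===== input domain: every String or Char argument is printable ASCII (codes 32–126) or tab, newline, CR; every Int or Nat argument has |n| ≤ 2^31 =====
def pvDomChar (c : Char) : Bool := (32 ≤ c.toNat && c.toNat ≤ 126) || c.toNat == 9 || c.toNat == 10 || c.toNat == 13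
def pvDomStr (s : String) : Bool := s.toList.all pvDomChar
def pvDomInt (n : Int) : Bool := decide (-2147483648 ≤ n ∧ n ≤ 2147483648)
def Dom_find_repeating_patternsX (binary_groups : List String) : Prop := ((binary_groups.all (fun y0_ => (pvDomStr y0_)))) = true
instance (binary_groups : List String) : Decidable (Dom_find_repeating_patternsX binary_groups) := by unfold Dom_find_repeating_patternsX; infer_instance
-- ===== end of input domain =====

-- B replaces A's per-position s.count test and dict tally by sort-and-group: per size it stably
-- sorts the (window, start) pairs, reads each window's count and first start off the adjacent
-- runs, and re-sorts the surviving runs by first start — the same result dict.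

-- ===== PORT A =====
def find_repeating_patternsX (binary_groups : List String) : List (String × Int) :=
  let concatenated_string := PySem.Str.join "" binary_groups
  let length := PySem.Str.len concatenated_string
  let patterns : PySem.Dict String Int :=
    (PySem.List.pyRange 1 (PySem.Int.floordiv length 2 + 1)).foldl
      (fun patterns size =>
        (PySem.List.pyRange 0 (length - size)).foldl
          (fun patterns start =>
            let pattern := PySem.Str.slice concatenated_string (some start) (some (start + size))
            if PySem.Str.count concatenated_string pattern > 1 then
              if patterns.contains pattern then
                patterns.insert pattern (patterns.getD pattern 0 + 1)
              else
                patterns.insert pattern 1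
            else patterns)
          patterns)
      PySem.Dict.empty
  -- {k: v for k, v in patterns.items() if v > 1}
  (patterns.items.foldl
    (fun d kv => if kv.2 > 1 then d.insert kv.1 kv.2 else d)
    (PySem.Dict.empty : PySem.Dict String Int)).items

-- ===== PORT B =====
-- port of Source B's _runs: the index-based while loop over a pair list becomes the standard
-- recursion on the remaining sublist; the inner scan `while pairs[j][0] == w: j += 1`
-- is takeWhile/dropWhile of the same predicate
def pvRuns : List (String × Int) → List (Int × String × Int)
  | [] => []
  | (w, i) :: rest =>
      (i, w, ((rest.takeWhile (fun p => p.1 == w)).length + 1 : Int)) ::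
        pvRuns (rest.dropWhile (fun p => p.1 == w))
termination_by pairs => pairs.length
decreasing_by
  have := (List.dropWhile_sublist (l := rest) (fun p => p.1 == w)).length_le
  simp only [List.length_cons]
  omega

def find_repeating_patternsX_alt (binary_groups : List String) : List (String × Int) :=
  let s := PySem.Str.join "" binary_groups
  let n := PySem.Str.len s
  ((PySem.List.pyRange 1 (PySem.Int.floordiv n 2 + 1)).foldl
    (fun result size =>
      let pairs := PySem.List.sorted
        ((PySem.List.pyRange 0 (n - size)).map
          (fun i => (PySem.Str.slice s (some i) (some (i + size)), i)))
        (fun p => p.1) false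
      let reps := (pvRuns pairs).filter
        (fun t => decide (1 < t.2.2) && decide (1 < PySem.Str.count s t.2.1))
      (PySem.List.sorted reps (fun t => t.1) false).foldl
        (fun result t => result.insert t.2.1 t.2.2) result)
    (PySem.Dict.empty : PySem.Dict String Int)).items

-- ===== PRECONDITION & SPEC =====
def Spec_find_repeating_patternsX (binary_groups : List String) (out : List (String × Int)) : Prop := out = find_repeating_patternsX_alt binary_groups
instance (binary_groups : List String) (out : List (String × Int)) : Decidable (Spec_find_repeating_patternsX binary_groups out) := by unfold Spec_find_repeating_patternsX; infer_instance

-- ===== CLAIM (what is proved, stated in full; the proofs are below) =====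
def Claim_equal_find_repeating_patternsX : Prop := ∀ (binary_groups : List String), Dom_find_repeating_patternsX binary_groups → Spec_find_repeating_patternsX binary_groups (find_repeating_patternsX binary_groups)

-- ===== LEMMAS AND PROOFS =====

-- a fold whose body is guarded by a data-only condition is a fold over the filtered list
theorem pvFoldl_ite {α β : Type} (g : β → α → β) (P : α → Prop) [DecidablePred P] :
    ∀ (xs : List α) (b : β),
      xs.foldl (fun b x => if P x then g b x else b) b
        = (xs.filter (fun x => decide (P x))).foldl g b := by
  intro xs
  induction xs with
  | nil => intro b; rfl
  | cons x xs ih =>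
    intro b
    by_cases h : P x <;> simp [h, ih]

-- A's contains-branch pair is exactly Counter's modify step
theorem pvBranch_eq_modify (d : PySem.Dict String Int) (p : String) :
    (if d.contains p then d.insert p (d.getD p 0 + 1) else d.insert p 1)
      = d.modify p 0 (· + 1) := by
  by_cases h : d.contains p
  · simp [h, PySem.Dict.modify]
  · have h0 : d.get? p = none :=
      (PySem.Dict.get?_eq_none_iff_contains d p).2 (by simpa using h)
    simp [h, PySem.Dict.modify, PySem.Dict.getD, h0]

theorem pvFoldl_add_append {α : Type} [BEq α] [LawfulBEq α] (s : List α) :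
    ∀ (r t : List α), (∀ x ∈ r, x ∉ s) →
      r.foldl PySem.Set.add (s ++ t) = s ++ r.foldl PySem.Set.add t := by
  intro r
  induction r with
  | nil => intro t _; rfl
  | cons x r ih =>
    intro t h
    have hxs : x ∉ s := h x (by simp)
    have hadd : PySem.Set.add (s ++ t) x = s ++ PySem.Set.add t x := by
      simp only [PySem.Set.add]
      simp [hxs]
      split <;> simp
    simp only [List.foldl_cons, hadd]
    exact ih (PySem.Set.add t x) (fun y hy => h y (by simp [hy]))

theorem pvOfList_append {α : Type} [BEq α] [LawfulBEq α] (l r : List α)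
    (h : ∀ x ∈ r, x ∉ l) :
    PySem.Set.ofList (l ++ r) = PySem.Set.ofList l ++ PySem.Set.ofList r := by
  have h2 : ∀ x ∈ r, x ∉ PySem.Set.ofList l := fun x hx hmem =>
    h x hx ((PySem.Set.mem_ofList l x).1 hmem)
  have := pvFoldl_add_append (PySem.Set.ofList l) r [] h2
  simpa [PySem.Set.ofList, List.foldl_append, PySem.Set.empty] using this

theorem pvOfList_filter {α : Type} [BEq α] [LawfulBEq α] (C : α → Bool) (xs : List α) :
    PySem.Set.ofList (xs.filter C) = (PySem.Set.ofList xs).filter C := by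
  induction xs using List.reverseRecOn with
  | nil => rfl
  | append_singleton xs x ih =>
    have hofl : ∀ (ys : List α), PySem.Set.ofList (ys ++ [x]) = PySem.Set.add (PySem.Set.ofList ys) x := by
      intro ys; simp [PySem.Set.ofList, List.foldl_append]
    rw [List.filter_append, List.filter_singleton, hofl]
    cases hC : C x with
    | false =>
      simp only [cond_false, List.append_nil, ih, PySem.Set.add]
      by_cases hm : x ∈ PySem.Set.ofList xs
      · simp [hm]
      · simp [hm, List.filter_append, hC]
    | true =>
      simp only [cond_true, hofl, ih, PySem.Set.add]
      by_cases hm : x ∈ PySem.Set.ofList xs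
      · have hmf : x ∈ (PySem.Set.ofList xs).filter C := List.mem_filter.2 ⟨hm, hC⟩
        simp [hm, hmf]
      · have hmf : x ∉ (PySem.Set.ofList xs).filter C := fun hc => hm (List.mem_filter.1 hc).1
        simp [hm, hmf, List.filter_append, hC]

-- per-size: counting the C-filtered window list and keeping v>1 equals counting all
-- windows and keeping (v>1 ∧ C)
theorem pvEntry {α : Type} [BEq α] [LawfulBEq α] (ps : List α) (C : α → Bool) :
    ((PySem.Set.ofList (ps.filter C)).map
        (fun k => (k, ((ps.filter C).count k : Int)))).filter (fun kv => decide (1 < kv.2))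
      = ((PySem.Set.ofList ps).map
        (fun k => (k, (ps.count k : Int)))).filter (fun kv => decide (1 < kv.2) && C kv.1) := by
  rw [pvOfList_filter, List.filter_map, List.filter_map]
  rw [List.filter_filter]
  have hpred : ∀ k, ((fun kv => decide (1 < kv.2) && C kv.1) ∘ (fun k => (k, (ps.count k : Int)))) k
      = (fun k => decide (1 < ((ps.filter C).count k : Int)) && C k) k := by
    intro k
    cases hC : C k with
    | false => simp [hC]
    | true => simp [hC, List.count_filter hC]
  rw [List.filter_congr (fun k _ => hpred k)]
  apply List.map_congr_left
  intro k hk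
  have hC : C k = true := by
    have := (List.mem_filter.1 hk).2
    exact (Bool.and_elim_right this)
  simp [List.count_filter hC]

-- across pairwise-disjoint blocks the global counter splits into per-block counters
theorem pvBlocks {α : Type} [BEq α] [LawfulBEq α] :
    ∀ (Ls : List (List α)), List.Pairwise List.Disjoint Ls →
      ((PySem.Set.ofList Ls.flatten).map
          (fun k => (k, (Ls.flatten.count k : Int)))).filter (fun kv => decide (1 < kv.2))
        = (Ls.map (fun l => ((PySem.Set.ofList l).map
            (fun k => (k, (l.count k : Int)))).filter (fun kv => decide (1 < kv.2)))).flatten := by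
  intro Ls
  induction Ls with
  | nil => intro _; rfl
  | cons l Ls ih =>
    intro hd
    have hdl : ∀ l' ∈ Ls, List.Disjoint l l' := (List.pairwise_cons.1 hd).1
    have hdf : ∀ x ∈ Ls.flatten, x ∉ l := by
      intro x hx hxl
      obtain ⟨l', hl', hxl'⟩ := List.mem_flatten.1 hx
      exact hdl l' hl' hxl hxl'
    rw [List.flatten_cons, pvOfList_append l Ls.flatten hdf, List.map_append, List.filter_append]
    have h1 : (PySem.Set.ofList l).map (fun k => (k, ((l ++ Ls.flatten).count k : Int)))
        = (PySem.Set.ofList l).map (fun k => (k, (l.count k : Int))) := by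
      apply List.map_congr_left
      intro k hk
      have hkl : k ∈ l := (PySem.Set.mem_ofList l k).1 hk
      have : Ls.flatten.count k = 0 := List.count_eq_zero.2 (fun hc => hdf k hc hkl)
      simp [List.count_append, this]
    have h2 : (PySem.Set.ofList Ls.flatten).map (fun k => (k, ((l ++ Ls.flatten).count k : Int)))
        = (PySem.Set.ofList Ls.flatten).map (fun k => (k, (Ls.flatten.count k : Int))) := by
      apply List.map_congr_left
      intro k hk
      have hkf : k ∈ Ls.flatten := (PySem.Set.mem_ofList _ k).1 hk
      have : l.count k = 0 := List.count_eq_zero.2 (fun hc => hdf k hkf hc)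
      simp [List.count_append, this]
    rw [h1, h2, ih (List.pairwise_cons.1 hd).2, List.map_cons, List.flatten_cons]

-- the per-size window list, its repeating-filtered form, and their collections
def pvPats (s : String) (size : Int) : List String :=
  (PySem.List.pyRange 0 (PySem.Str.len s - size)).map
    (fun start => PySem.Str.slice s (some start) (some (start + size)))

def pvFl (s : String) (size : Int) : List String :=
  (pvPats s size).filter (fun p => decide (1 < PySem.Str.count s p))

def pvLs (s : String) : List (List String) :=
  (PySem.List.pyRange 1 (PySem.Int.floordiv (PySem.Str.len s) 2 + 1)).map (pvFl s)

-- every window of size `size` really has `size` characters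
theorem pvLen (s : String) (size start : Int) (h1 : 1 ≤ size) (h0 : 0 ≤ start)
    (h2 : start < PySem.Str.len s - size) :
    (PySem.Str.slice s (some start) (some (start + size))).toList.length = size.toNat := by
  have hlen : PySem.Str.len s = (s.toList.length : Int) := PySem.Str.len_eq s
  rw [PySem.Str.toList_slice, PySem.Chars.slice_eq_listSlice,
    PySem.List.slice_of_nonneg _ h0 (by omega) (by omega) (by omega)]
  simp only [List.length_take, List.length_drop]
  omega

theorem pvMemPats (s : String) (size : Int) (p : String) (h1 : 1 ≤ size)
    (hp : p ∈ pvPats s size) : p.toList.length = size.toNat := by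
  obtain ⟨start, hs, rfl⟩ := List.mem_map.1 hp
  have := (PySem.List.mem_pyRange_iff_of_pos (by norm_num) start).1 hs
  exact pvLen s size start h1 this.1 this.2.1

theorem pvSizesPairwise (s : String) :
    List.Pairwise (fun a b => 1 ≤ a ∧ a < b)
      (PySem.List.pyRange 1 (PySem.Int.floordiv (PySem.Str.len s) 2 + 1)) := by
  rw [PySem.List.pyRange_of_pos _ _ (by norm_num)]
  refine List.Pairwise.map (fun k : Nat => 1 + 1 * (k : Int)) ?_ List.pairwise_lt_range
  intro a b hab
  push_cast
  omega

theorem pvLsDisjoint (s : String) : List.Pairwise List.Disjoint (pvLs s) := by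
  rw [pvLs]
  rw [List.pairwise_map]
  apply (pvSizesPairwise s).imp
  intro a b hab p hpa hpb
  have ha : p.toList.length = a.toNat :=
    pvMemPats s a p hab.1 (List.mem_of_mem_filter hpa)
  have hb : p.toList.length = b.toNat :=
    pvMemPats s b p (by omega) (List.mem_of_mem_filter hpb)
  omega

-- ===== A-side normalization =====
theorem pvAinner (s : String) (size : Int) (d : PySem.Dict String Int) :
      (PySem.List.pyRange 0 (PySem.Str.len s - size)).foldl
        (fun patterns start =>
          if 1 < PySem.Str.count s (PySem.Str.slice s (some start) (some (start + size))) then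
            if patterns.contains (PySem.Str.slice s (some start) (some (start + size))) then
              patterns.insert (PySem.Str.slice s (some start) (some (start + size)))
                (patterns.getD (PySem.Str.slice s (some start) (some (start + size))) 0 + 1)
            else
              patterns.insert (PySem.Str.slice s (some start) (some (start + size))) 1
          else patterns)
        d
      = (pvFl s size).foldl (fun d p => d.modify p 0 (· + 1)) d := by
  have h1 := List.foldl_map
    (f := fun start : Int => PySem.Str.slice s (some start) (some (start + size)))
    (g := fun (d : PySem.Dict String Int) (p : String) =>
      if 1 < PySem.Str.count s p then
        (if d.contains p then d.insert p (d.getD p 0 + 1) else d.insert p 1)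
      else d)
    (l := PySem.List.pyRange 0 (PySem.Str.len s - size)) (init := d)
  rw [← h1]
  rw [pvFl, pvPats, ← pvFoldl_ite
    (fun d p => PySem.Dict.modify d p 0 (· + 1)) (fun p => 1 < PySem.Str.count s p)]
  simp only [pvBranch_eq_modify]

theorem pvAouter (s : String) :
    (PySem.List.pyRange 1 (PySem.Int.floordiv (PySem.Str.len s) 2 + 1)).foldl
      (fun d size => (pvFl s size).foldl (fun d p => d.modify p 0 (· + 1)) d)
      (PySem.Dict.empty : PySem.Dict String Int)
    = PySem.Dict.counter (pvLs s).flatten := by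
  rw [PySem.Dict.counter_eq_foldl, List.foldl_flatten, pvLs,
    List.foldl_map (f := pvFl s)
      (g := fun (d : PySem.Dict String Int) (l : List String) =>
        l.foldl (fun d x => d.modify x 0 (· + 1)) d)]

-- A's trailing dict comprehension keeps exactly the v>1 items
theorem pvFinal (d : PySem.Dict String Int)
    (hn : (d.items.map (fun kv => kv.1)).Nodup) :
    (d.items.foldl (fun d kv => if 1 < kv.2 then d.insert kv.1 kv.2 else d)
      (PySem.Dict.empty : PySem.Dict String Int)).items
    = d.items.filter (fun kv => decide (1 < kv.2)) := by
  rw [pvFoldl_ite (fun d kv => PySem.Dict.insert d kv.1 kv.2) (fun kv : String × Int => 1 < kv.2)]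
  rw [PySem.Dict.items_foldl_insert_fresh _ Prod.fst Prod.snd _
    (fun a _ => PySem.Dict.contains_empty a.1)
    ((List.filter_sublist (l := d.items)).map (fun kv => kv.1) |>.nodup hn)]
  simp [PySem.Dict.empty]

theorem pvNodupFstCounter (xs : List String) :
    ((PySem.Dict.counter xs).items.map (fun kv => kv.1)).Nodup := by
  have := PySem.Dict.nodup_keys_counter xs
  simpa [PySem.Dict.keys] using this

-- per-size distinct-window summary both sides are proved equal to
def pvE (s : String) (size : Int) : List (String × Int) :=
  ((PySem.Set.ofList (pvPats s size)).map
      (fun k => (k, ((pvPats s size).count k : Int)))).filter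
    (fun kv => decide (1 < kv.2) && decide (1 < PySem.Str.count s kv.1))

-- ===== the A-side summary: A's filtered global counter = flatten of pvE over sizes =====
theorem pvMid (s : String) :
    (PySem.Dict.counter (pvLs s).flatten).items.filter (fun kv => decide (1 < kv.2))
    = ((PySem.List.pyRange 1 (PySem.Int.floordiv (PySem.Str.len s) 2 + 1)).map (pvE s)).flatten := by
  rw [PySem.Dict.items_counter, pvBlocks _ (pvLsDisjoint s), pvLs, List.map_map]
  congr 1
  apply List.map_congr_left
  intro size _
  show ((PySem.Set.ofList (pvFl s size)).map
      (fun k => (k, ((pvFl s size).count k : Int)))).filter (fun kv => decide (1 < kv.2))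
    = pvE s size
  rw [pvFl, pvEntry (pvPats s size) (fun p => decide (1 < PySem.Str.count s p)), pvE]

-- ===== B-side: stability of PySem's insertion sort, runs of a key-sorted list =====

-- first start stored in a run (snd of the head pair)
def pvFirst : List (String × Int) → Int
  | [] => 0
  | p :: _ => p.2

-- insertBy walks past a prefix it is not inserted before
theorem pvInsPass {α : Type} (bf : α → α → Bool) (x : α) :
    ∀ (l r : List α), (∀ y ∈ l, bf x y = false) →
      PySem.List.insertBy bf x (l ++ r) = l ++ PySem.List.insertBy bf x r := by
  intro l
  induction l with
  | nil => intro r _; rfl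
  | cons y t ih =>
    intro r h
    have hy : bf x y = false := h y (by simp)
    simp only [List.cons_append, PySem.List.insertBy, hy, Bool.false_eq_true, if_false]
    rw [ih r (fun z hz => h z (by simp [hz]))]

-- insertBy goes to the very front when everything compares after x
theorem pvInsFront {α : Type} (bf : α → α → Bool) (x : α) :
    ∀ (ys : List α), (∀ y ∈ ys, bf x y = true) →
      PySem.List.insertBy bf x ys = x :: ys := by
  intro ys h
  cases ys with
  | nil => rfl
  | cons y t => simp [PySem.List.insertBy, h y (by simp)]

-- inserting an element whose key is already a block key appends it to that block
theorem pvInsMem {α : Type} (key : α → String) (x : α) (B : String → List α)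
    (hB : ∀ k, ∀ a ∈ B k, key a = k) :
    ∀ K : List String, K.Pairwise (· < ·) → key x ∈ K →
      PySem.List.insertBy (fun a b => decide (key a < key b)) x (K.flatMap B)
        = K.flatMap (fun k => if k == key x then B k ++ [x] else B k) := by
  intro K
  induction K with
  | nil => intro _ hx; exact absurd hx (by simp)
  | cons k0 K' ih =>
    intro hp hx
    have hp' := List.pairwise_cons.1 hp
    by_cases hk : k0 = key x
    · subst hk
      have hnot : ∀ y ∈ B (key x), (fun a b => decide (key a < key b)) x y = false := by
        intro y hy
        have hky := hB _ y hy
        have : ¬ (key x < key y) := by rw [hky]; exact lt_irrefl _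
        simp [this]
      rw [List.flatMap_cons, pvInsPass _ x _ _ hnot]
      have hall : ∀ y ∈ K'.flatMap B, (fun a b => decide (key a < key b)) x y = true := by
        intro y hy
        obtain ⟨k', hk', hy'⟩ := List.mem_flatMap.1 hy
        have hky := hB k' y hy'
        have : key x < key y := by rw [hky]; exact hp'.1 k' hk'
        simp [this]
      rw [pvInsFront _ x _ hall, List.flatMap_cons]
      have hK' : ∀ k ∈ K', (if k == key x then B k ++ [x] else B k) = B k := by
        intro k hk
        have : k ≠ key x := fun h => absurd (h ▸ hp'.1 k hk) (lt_irrefl _)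
        simp [this]
      rw [List.flatMap_congr hK']
      simp
    · have hx' : key x ∈ K' := by
        rcases List.mem_cons.1 hx with h | h
        · exact absurd h.symm hk
        · exact h
      have hnot : ∀ y ∈ B k0, (fun a b => decide (key a < key b)) x y = false := by
        intro y hy
        have hky := hB k0 y hy
        have : ¬ (key x < key y) := by rw [hky]; exact lt_asymm (hp'.1 _ hx')
        simp [this]
      rw [List.flatMap_cons, pvInsPass _ x _ _ hnot, ih hp'.2 hx', List.flatMap_cons]
      have : (k0 == key x) = false := by simp [hk]
      simp [this]

-- inserting an element with a fresh key inserts a fresh singleton block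
theorem pvInsNew {α : Type} (key : α → String) (x : α) (B : String → List α)
    (hB : ∀ k, ∀ a ∈ B k, key a = k) :
    ∀ K : List String, K.Pairwise (· < ·) → (∀ k ∈ K, k ≠ key x) → B (key x) = [x] →
      PySem.List.insertBy (fun a b => decide (key a < key b)) x (K.flatMap B)
        = (PySem.List.insertBy (fun a b => decide (a < b)) (key x) K).flatMap B := by
  intro K
  induction K with
  | nil =>
    intro _ _ hBx
    simp [PySem.List.insertBy, hBx]
  | cons k0 K' ih =>
    intro hp hne hBx
    have hp' := List.pairwise_cons.1 hp
    have hk0 : k0 ≠ key x := hne k0 (by simp)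
    rcases lt_or_gt_of_ne hk0 with hlt | hgt
    · -- k0 < key x : walk past the k0 block on both sides
      have hnot : ∀ y ∈ B k0, (fun a b => decide (key a < key b)) x y = false := by
        intro y hy
        have hky := hB k0 y hy
        have : ¬ (key x < key y) := by rw [hky]; exact lt_asymm hlt
        simp [this]
      rw [List.flatMap_cons, pvInsPass _ x _ _ hnot,
        ih hp'.2 (fun k hk => hne k (by simp [hk])) hBx]
      have hbf : (fun a b => decide (a < b)) (key x) k0 = false := by
        simp [lt_asymm hlt]
      simp only [PySem.List.insertBy, hbf, Bool.false_eq_true, if_false, List.flatMap_cons]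
    · -- key x < k0 : x goes to the very front, and so does its key
      have hall : ∀ y ∈ (k0 :: K').flatMap B, (fun a b => decide (key a < key b)) x y = true := by
        intro y hy
        obtain ⟨k', hk', hy'⟩ := List.mem_flatMap.1 hy
        have hky := hB k' y hy'
        have hkk : key x < k' := by
          rcases List.mem_cons.1 hk' with h | h
          · exact h ▸ hgt
          · exact lt_trans hgt (hp'.1 k' h)
        have : key x < key y := by rw [hky]; exact hkk
        simp [this]
      rw [pvInsFront _ x _ hall]
      have hbf : (fun a b => decide (a < b)) (key x) k0 = true := by simp [hgt]
      simp only [PySem.List.insertBy, hbf, if_true, List.flatMap_cons, hBx]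
      simp

-- PySem's insertion sort is stable: the sorted list is, block by block in key order,
-- the original order of each key class
theorem pvStable {α : Type} (key : α → String) :
    ∀ xs : List α,
      PySem.List.sorted xs key false
        = (PySem.List.sorted (PySem.Set.ofList (xs.map key)) (fun k => k) false).flatMap
            (fun k => xs.filter (fun a => key a == k)) := by
  intro xs
  induction xs using List.reverseRecOn with
  | nil => rfl
  | append_singleton xs x ih =>
    have hK := PySem.List.sorted_ofList_pairwise_lt (xs.map key)
    have hmemK : ∀ k, k ∈ PySem.List.sorted (PySem.Set.ofList (xs.map key)) (fun k => k) false
        ↔ k ∈ xs.map key := by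
      intro k
      rw [PySem.List.mem_sorted, PySem.Set.mem_ofList]
    -- LHS: one more insertion into the sorted prefix
    have hL : PySem.List.sorted (xs ++ [x]) key false
        = PySem.List.insertBy (fun a b => decide (key a < key b)) x
            (PySem.List.sorted xs key false) := by
      rw [PySem.List.sorted_eq_foldl_insertBy, List.foldl_append,
        ← PySem.List.sorted_eq_foldl_insertBy]
      rfl
    -- blocks of xs ++ [x]
    have hblk : ∀ k, (xs ++ [x]).filter (fun a => key a == k)
        = xs.filter (fun a => key a == k) ++ (if key x == k then [x] else []) := by
      intro k
      rw [List.filter_append, List.filter_singleton]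
      cases h : (key x == k) <;> simp
    by_cases hmem : key x ∈ xs.map key
    · -- key already present: the key list is unchanged, x joins its block
      have hset : PySem.Set.ofList ((xs ++ [x]).map key) = PySem.Set.ofList (xs.map key) := by
        rw [List.map_append, List.map_singleton]
        have : PySem.Set.ofList (xs.map key ++ [key x])
            = PySem.Set.add (PySem.Set.ofList (xs.map key)) (key x) := by
          simp [PySem.Set.ofList, List.foldl_append]
        rw [this, PySem.Set.add]
        have hc : (PySem.Set.ofList (xs.map key)).contains (key x) = true :=
          List.elem_eq_true_of_mem ((PySem.Set.mem_ofList _ _).2 hmem)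
        rw [if_pos hc]
      rw [hL, ih, hset,
        pvInsMem key x _ (fun k a ha => by simpa using (List.mem_filter.1 ha).2) _ hK
          ((hmemK _).2 hmem)]
      apply List.flatMap_congr
      intro k _
      rw [hblk k]
      by_cases h : k = key x
      · subst h; simp
      · have h1 : (k == key x) = false := by simp [h]
        have h2 : (key x == k) = false := by simp [Ne.symm h]
        simp [h1, h2]
    · -- fresh key: it is inserted into the key list with the singleton block [x]
      have hset : PySem.Set.ofList ((xs ++ [x]).map key)
          = PySem.Set.ofList (xs.map key) ++ [key x] := by
        rw [List.map_append, List.map_singleton]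
        rw [pvOfList_append _ _ (by simpa using hmem)]
        rfl
      have hK' : PySem.List.sorted (PySem.Set.ofList (xs.map key) ++ [key x]) (fun k => k) false
          = PySem.List.insertBy (fun a b => decide (a < b)) (key x)
              (PySem.List.sorted (PySem.Set.ofList (xs.map key)) (fun k => k) false) := by
        rw [PySem.List.sorted_eq_foldl_insertBy, List.foldl_append,
          ← PySem.List.sorted_eq_foldl_insertBy]
        rfl
      have hBx : (xs ++ [x]).filter (fun a => key a == key x) = [x] := by
        rw [hblk (key x)]
        have : xs.filter (fun a => key a == key x) = [] := by
          rw [List.filter_eq_nil_iff]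
          intro a ha
          simp only [beq_iff_eq]
          intro h
          exact hmem (h ▸ List.mem_map_of_mem ha)
        simp [this]
      have hold : ∀ k ∈ PySem.List.sorted (PySem.Set.ofList (xs.map key)) (fun k => k) false,
          (xs ++ [x]).filter (fun a => key a == k) = xs.filter (fun a => key a == k) := by
        intro k hk
        rw [hblk k]
        have : (key x == k) = false := by
          simp only [beq_eq_false_iff_ne, ne_eq]
          intro h
          exact hmem (h ▸ (hmemK k).1 hk)
        simp [this]
      rw [hL, ih, ← List.flatMap_congr hold,
        pvInsNew key x _ (fun k a ha => by simpa using (List.mem_filter.1 ha).2) _ hK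
          (fun k hk h => hmem (h ▸ (hmemK k).1 hk)) hBx,
        hset, hK']

-- the (window, start) pair list Source B sorts, and helper facts about its key blocks
def pvP (s : String) (size : Int) : List (String × Int) :=
  (PySem.List.pyRange 0 (PySem.Str.len s - size)).map
    (fun i => (PySem.Str.slice s (some i) (some (i + size)), i))

theorem pvPmap (s : String) (size : Int) : (pvP s size).map (fun p => p.1) = pvPats s size := by
  rw [pvP, pvPats, List.map_map]
  rfl

theorem pvPsnd (s : String) (size : Int) : (pvP s size).Pairwise (fun p q => p.2 < q.2) := by
  rw [pvP, List.pairwise_map]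
  exact PySem.List.pairwise_lt_pyRange_one 0 (PySem.Str.len s - size)

theorem pvBlkNe (Q : List (String × Int)) (k : String)
    (hk : k ∈ Q.map (fun p => p.1)) : Q.filter (fun p => p.1 == k) ≠ [] := by
  obtain ⟨p, hp, rfl⟩ := List.mem_map.1 hk
  exact List.ne_nil_of_mem (List.mem_filter.2 ⟨hp, by simp⟩)

theorem pvBlkLen (Q : List (String × Int)) (k : String) :
    (Q.filter (fun p => p.1 == k)).length = (Q.map (fun p => p.1)).count k := by
  rw [List.count_eq_countP, List.countP_map, ← List.countP_eq_length_filter]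
  rfl

theorem pvFirst_append_left (l l' : List (String × Int)) (h : l ≠ []) :
    pvFirst (l ++ l') = pvFirst l := by
  cases l with
  | nil => exact absurd rfl h
  | cons p t => rfl

theorem pvFirst_mem (l : List (String × Int)) (h : l ≠ []) : ∃ p ∈ l, pvFirst l = p.2 := by
  cases l with
  | nil => exact absurd rfl h
  | cons p t => exact ⟨p, by simp, rfl⟩

-- splitting takeWhile/dropWhile at the boundary of a satisfied prefix
theorem pvSplit {α : Type} (q : α → Bool) :
    ∀ (t r : List α), (∀ y ∈ t, q y = true) → (∀ y ∈ r, q y = false) →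
      (t ++ r).takeWhile q = t ∧ (t ++ r).dropWhile q = r := by
  intro t
  induction t with
  | nil =>
    intro r _ hr
    cases r with
    | nil => simp
    | cons y r' => simp [hr y (by simp)]
  | cons y t' ih =>
    intro r ht hr
    have hy : q y = true := ht y (by simp)
    have := ih r (fun z hz => ht z (by simp [hz])) hr
    simp [hy, this.1, this.2]

-- the runs of a block-concatenated list: one triple per block
theorem pvRunsFlat (B : String → List (String × Int))
    (hB : ∀ k, ∀ p ∈ B k, p.1 = k) :
    ∀ K : List String, K.Pairwise (· ≠ ·) → (∀ k ∈ K, B k ≠ []) →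
      pvRuns (K.flatMap B) = K.map (fun k => (pvFirst (B k), k, ((B k).length : Int))) := by
  intro K
  induction K with
  | nil => intro _ _; simp [pvRuns]
  | cons k0 K' ih =>
    intro hp hne
    have hp' := List.pairwise_cons.1 hp
    cases hBk : B k0 with
    | nil => exact absurd hBk (hne k0 (by simp))
    | cons p t =>
      obtain ⟨w, i⟩ := p
      have hw : w = k0 := hB k0 (w, i) (by rw [hBk]; simp)
      have ht : ∀ y ∈ t, (fun p : String × Int => p.1 == w) y = true := by
        intro y hy
        have : y.1 = k0 := hB k0 y (by rw [hBk]; simp [hy])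
        simp [this, hw]
      have hr : ∀ y ∈ K'.flatMap B, (fun p : String × Int => p.1 == w) y = false := by
        intro y hy
        obtain ⟨k', hk', hy'⟩ := List.mem_flatMap.1 hy
        have : y.1 = k' := hB k' y hy'
        have hne' : k0 ≠ k' := hp'.1 k' hk'
        simp [this, hw]
        exact fun h => hne' h.symm
      have hsplit := pvSplit (fun p : String × Int => p.1 == w) t (K'.flatMap B) ht hr
      rw [List.flatMap_cons, hBk, List.cons_append, pvRuns, hsplit.1, hsplit.2,
        ih hp'.2 (fun k hk => hne k (by simp [hk]))]
      rw [List.map_cons]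
      have h1 : pvFirst (B k0) = i := by rw [hBk]; rfl
      have h2 : ((B k0).length : Int) = (t.length : Int) + 1 := by rw [hBk]; simp
      rw [h1, h2, hw]

-- a key already collected: appending an occurrence does not change the key set
theorem pvOfList_snoc_mem {α : Type} [BEq α] [LawfulBEq α] (l : List α) (x : α) (h : x ∈ l) :
    PySem.Set.ofList (l ++ [x]) = PySem.Set.ofList l := by
  have h1 : PySem.Set.ofList (l ++ [x]) = PySem.Set.add (PySem.Set.ofList l) x := by
    simp [PySem.Set.ofList, List.foldl_append]
  have hc : (PySem.Set.ofList l).contains x = true :=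
    List.elem_eq_true_of_mem ((PySem.Set.mem_ofList _ _).2 h)
  rw [h1, PySem.Set.add, if_pos hc]

-- first start positions strictly increase along the first-occurrence key order
theorem pvHeadsPairwise :
    ∀ Q : List (String × Int), Q.Pairwise (fun p q => p.2 < q.2) →
      (PySem.Set.ofList (Q.map (fun p => p.1))).Pairwise
        (fun a b => pvFirst (Q.filter (fun p => p.1 == a)) < pvFirst (Q.filter (fun p => p.1 == b))) := by
  intro Q
  induction Q using List.reverseRecOn with
  | nil => intro _; simp [PySem.Set.ofList, PySem.Set.empty]
  | append_singleton Q q ih =>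
    intro hP
    have hparts := List.pairwise_append.1 hP
    have hlt : ∀ p ∈ Q, p.2 < q.2 := fun p hp => hparts.2.2 p hp q (by simp)
    have hfil : ∀ k, (Q ++ [q]).filter (fun p => p.1 == k)
        = Q.filter (fun p => p.1 == k) ++ (if q.1 == k then [q] else []) := by
      intro k
      rw [List.filter_append, List.filter_singleton]
      cases h : (q.1 == k) <;> simp
    have hmap : (Q ++ [q]).map (fun p : String × Int => p.1)
        = Q.map (fun p => p.1) ++ [q.1] := by simp
    have hkeep : ∀ a, a ∈ Q.map (fun p : String × Int => p.1) →
        pvFirst ((Q ++ [q]).filter (fun p => p.1 == a))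
          = pvFirst (Q.filter (fun p => p.1 == a)) := by
      intro a ha
      rw [hfil a, pvFirst_append_left _ _ (pvBlkNe Q a ha)]
    by_cases hm : q.1 ∈ Q.map (fun p : String × Int => p.1)
    · rw [hmap, pvOfList_snoc_mem _ _ hm]
      refine (ih hparts.1).imp_of_mem ?_
      intro a b ha hb hab
      have ha' := (PySem.Set.mem_ofList _ _).1 ha
      have hb' := (PySem.Set.mem_ofList _ _).1 hb
      rw [hkeep a ha', hkeep b hb']
      exact hab
    · rw [hmap, pvOfList_append _ _ (by simpa using hm)]
      have hsing : PySem.Set.ofList [q.1] = [q.1] := rfl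
      rw [hsing]
      rw [List.pairwise_append]
      refine ⟨?_, by simp, ?_⟩
      · refine (ih hparts.1).imp_of_mem ?_
        intro a b ha hb hab
        have ha' := (PySem.Set.mem_ofList _ _).1 ha
        have hb' := (PySem.Set.mem_ofList _ _).1 hb
        rw [hkeep a ha', hkeep b hb']
        exact hab
      · intro a ha b hb
        have hb' : b = q.1 := List.mem_singleton.1 hb
        subst hb'
        have ha' := (PySem.Set.mem_ofList _ _).1 ha
        -- right side: the fresh key's block is exactly [q]
        have hq : Q.filter (fun p => p.1 == q.1) = [] := by
          rw [List.filter_eq_nil_iff]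
          intro p hp
          simp only [beq_iff_eq]
          intro h
          exact hm (h ▸ List.mem_map_of_mem hp)
        have hrhs : pvFirst ((Q ++ [q]).filter (fun p => p.1 == q.1)) = q.2 := by
          rw [hfil q.1, hq]
          simp [pvFirst]
        -- left side: the head of a's block is an element of Q
        rw [hkeep a ha', hrhs]
        obtain ⟨p, hp, hpv⟩ := pvFirst_mem _ (pvBlkNe Q a ha')
        rw [hpv]
        exact hlt p (List.mem_of_mem_filter hp)

-- the per-size triple list both sides reduce to: distinct windows in first-occurrence
-- order with their counts, restricted to the repeating ones
def pvT (s : String) (size : Int) : List (Int × String × Int) :=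
  ((PySem.Set.ofList (pvPats s size)).filter
      (fun k => decide (1 < ((pvPats s size).count k : Int)) && decide (1 < PySem.Str.count s k))).map
    (fun k => (pvFirst ((pvP s size).filter (fun p => p.1 == k)), k,
      ((pvPats s size).count k : Int)))

-- B's per-size pipeline (stable sort, runs, filter, re-sort by first start) yields pvT
theorem pvBsize (s : String) (size : Int) :
    PySem.List.sorted
      ((pvRuns (PySem.List.sorted (pvP s size) (fun p => p.1) false)).filter
        (fun t => decide (1 < t.2.2) && decide (1 < PySem.Str.count s t.2.1)))
      (fun t => t.1) false
    = pvT s size := by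
  have hstable := pvStable (fun p : String × Int => p.1) (pvP s size)
  rw [pvPmap] at hstable
  have hK := PySem.List.sorted_ofList_pairwise_lt (pvPats s size)
  have hruns := pvRunsFlat (fun k => (pvP s size).filter (fun p => p.1 == k))
    (fun k p hp => by simpa using (List.mem_filter.1 hp).2)
    (PySem.List.sorted (PySem.Set.ofList (pvPats s size)) (fun k => k) false)
    (hK.imp ne_of_lt)
    (fun k hk => pvBlkNe (pvP s size) k
      (by rw [pvPmap]; exact (PySem.Set.mem_ofList _ _).1 ((PySem.List.mem_sorted _ _ _ _).1 hk)))
  have hcnt : ∀ k : String, (((pvP s size).filter (fun p => p.1 == k)).length : Int)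
      = ((pvPats s size).count k : Int) := by
    intro k
    rw [pvBlkLen, pvPmap]
  rw [hstable, hruns]
  apply PySem.List.sorted_eq_of_perm_of_pairwise_lt (κ := Int) _ _ (fun t : Int × String × Int => t.1)
  · -- the target is a permutation of the filtered run list
    rw [List.filter_map, pvT]
    have hc : ((fun t : Int × String × Int =>
          decide (1 < t.2.2) && decide (1 < PySem.Str.count s t.2.1)) ∘
        (fun k => (pvFirst ((pvP s size).filter (fun p => p.1 == k)), k,
          (((pvP s size).filter (fun p => p.1 == k)).length : Int))))
        = fun k => decide (1 < (((pvP s size).filter (fun p => p.1 == k)).length : Int))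
            && decide (1 < PySem.Str.count s k) := rfl
    rw [hc]
    have hmapeq : ∀ K : List String,
        K.map (fun k => (pvFirst ((pvP s size).filter (fun p => p.1 == k)), k,
            (((pvP s size).filter (fun p => p.1 == k)).length : Int)))
          = K.map (fun k => (pvFirst ((pvP s size).filter (fun p => p.1 == k)), k,
            ((pvPats s size).count k : Int))) := by
      intro K
      exact List.map_congr_left (fun k _ => by rw [hcnt k])
    have hfilteq : ∀ K : List String,
        K.filter (fun k => decide (1 < (((pvP s size).filter (fun p => p.1 == k)).length : Int))
            && decide (1 < PySem.Str.count s k))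
          = K.filter (fun k => decide (1 < ((pvPats s size).count k : Int))
            && decide (1 < PySem.Str.count s k)) := by
      intro K
      exact List.filter_congr (fun k _ => by rw [hcnt k])
    rw [hmapeq, hfilteq]
    have hKperm : (PySem.Set.ofList (pvPats s size)).Perm
        (PySem.List.sorted (PySem.Set.ofList (pvPats s size)) (fun k => k) false) :=
      (PySem.List.sorted_perm _ _ _).symm
    exact ((hKperm.filter _).map _)
  · -- the target is strictly increasing in the first start position
    rw [pvT, List.pairwise_map]
    refine List.Pairwise.filter _ ?_
    have := pvHeadsPairwise (pvP s size) (pvPsnd s size)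
    rw [pvPmap] at this
    exact this

-- per-size keys are exactly the filtered distinct windows (nodup), pairwise
-- disjoint across sizes because windows of size `size` have length `size`
theorem pvTNodup (s : String) :
    ((((PySem.List.pyRange 1 (PySem.Int.floordiv (PySem.Str.len s) 2 + 1)).map
        (fun size => pvT s size)).flatten).map (fun t => t.2.1)).Nodup := by
  rw [List.map_flatten, List.map_map]
  rw [List.nodup_flatten]
  constructor
  · intro l hl
    obtain ⟨size, _, rfl⟩ := List.mem_map.1 hl
    show (((pvT s size)).map (fun t => t.2.1)).Nodup
    rw [pvT, List.map_map]
    have : ((fun t : Int × String × Int => t.2.1) ∘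
        (fun k => (pvFirst ((pvP s size).filter (fun p => p.1 == k)), k,
          ((pvPats s size).count k : Int)))) = fun k => k := rfl
    rw [this, List.map_id']
    exact (List.filter_sublist (l := PySem.Set.ofList (pvPats s size))).nodup
      (PySem.Set.nodup_ofList _)
  · rw [List.pairwise_map]
    apply (pvSizesPairwise s).imp
    intro a b hab k hka hkb
    have hmem : ∀ (sz : Int), k ∈ (pvT s sz).map (fun t => t.2.1) → k ∈ pvPats s sz := by
      intro sz hk
      obtain ⟨t, ht, rfl⟩ := List.mem_map.1 hk
      rw [pvT] at ht
      obtain ⟨k', hk', rfl⟩ := List.mem_map.1 ht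
      exact (PySem.Set.mem_ofList _ _).1 (List.mem_of_mem_filter hk')
    have ha := pvMemPats s a k hab.1 (hmem a hka)
    have hb := pvMemPats s b k (by omega) (hmem b hkb)
    omega

-- B's whole fold, flattened: the items are the per-size pvE lists in size order
theorem pvBouter (s : String) :
    ((PySem.List.pyRange 1 (PySem.Int.floordiv (PySem.Str.len s) 2 + 1)).foldl
      (fun result size =>
        (PySem.List.sorted
          ((pvRuns (PySem.List.sorted (pvP s size) (fun p => p.1) false)).filter
            (fun t => decide (1 < t.2.2) && decide (1 < PySem.Str.count s t.2.1)))
          (fun t => t.1) false).foldl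
          (fun result t => result.insert t.2.1 t.2.2) result)
      (PySem.Dict.empty : PySem.Dict String Int)).items
    = ((PySem.List.pyRange 1 (PySem.Int.floordiv (PySem.Str.len s) 2 + 1)).map (pvE s)).flatten := by
  simp only [pvBsize]
  rw [← List.foldl_map (f := fun size => pvT s size)
      (g := fun (r : PySem.Dict String Int) (l : List (Int × String × Int)) =>
        l.foldl (fun r t => r.insert t.2.1 t.2.2) r),
    ← List.foldl_flatten]
  have h := PySem.Dict.items_foldl_insert_fresh
    (((PySem.List.pyRange 1 (PySem.Int.floordiv (PySem.Str.len s) 2 + 1)).map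
      (fun size => pvT s size)).flatten)
    (fun t : Int × String × Int => t.2.1) (fun t => t.2.2)
    (PySem.Dict.empty : PySem.Dict String Int)
    (fun a _ => PySem.Dict.contains_empty a.2.1) (pvTNodup s)
  beta_reduce at h
  rw [h]
  have hempty : (PySem.Dict.empty : PySem.Dict String Int).items = [] := rfl
  rw [hempty, List.nil_append, List.map_flatten, List.map_map]
  congr 1
  apply List.map_congr_left
  intro size _
  show (pvT s size).map (fun t => (t.2.1, t.2.2)) = pvE s size
  rw [pvT, pvE, List.filter_map, List.map_map]
  rfl

-- ===== VERDICT (by name: the statement is the Claim_ definition above) =====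
theorem find_repeating_patternsX_spec : Claim_equal_find_repeating_patternsX := by
  intro binary_groups _
  show find_repeating_patternsX binary_groups = find_repeating_patternsX_alt binary_groups
  simp only [find_repeating_patternsX, find_repeating_patternsX_alt, gt_iff_lt]
  generalize PySem.Str.join "" binary_groups = s
  simp only [pvAinner s]
  rw [pvAouter s, pvFinal _ (pvNodupFstCounter _), pvMid s]
  exact (pvBouter s).symm
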